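-- pv_equiv track=rewrite | github.com/DhruvMeduri/Stadium_Seating | OLD/max_cluster_rectangle/stadium_sample.py | rectangle_with_hole_waste
-- ===== SOURCE A (Python) =====
-- def rectangle_with_hole_waste(wasted,size,l,b):
--     # Input: Set of wasted seats initially empty, size of super square.
--     # Output: Returns the seats wasted by removing seats from the super square to represent a rectangle with a hole.
--     for r in range(size):
--         for c in range (size):
--             if r>=l or c>=b:
--                 wasted.add(r*size + c)
--     for r in range(l-8,l-3):
--         for c in range(3,8):
--             wasted.add(r*size + c)
--     return wasted
-- ===== SOURCE B (Python) =====
-- def rectangle_with_hole_waste(wasted, size, l, b):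
--     # Complement construction: the kept rectangle (clipped to the grid) is
--     # enumerated once as a set; every grid cell not in it is wasted.  The hole
--     # block keeps A's literal ranges.  Mutates `wasted` in place, like A.
--     kept = {r * size + c for r in range(min(l, size)) for c in range(min(b, size))}
--     grid = (r * size + c for r in range(size) for c in range(size))
--     wasted.update(i for i in grid if i not in kept)
--     wasted.update(r * size + c for r in range(l - 8, l - 3) for c in range(3, 8))
--     return wasted
-- ===== Notes on version B (the rewrite author's own statement) =====
-- stated objective: simpler
-- what changed: Replaces the full grid scan with an OR-test per cell by a complement construction: the kept rectangle (clipped to the grid) is enumerated once as a set and every grid cell not in it is wasted; the hole block is added via a single set.update; the if-branch disappears.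
import Mathlib
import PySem

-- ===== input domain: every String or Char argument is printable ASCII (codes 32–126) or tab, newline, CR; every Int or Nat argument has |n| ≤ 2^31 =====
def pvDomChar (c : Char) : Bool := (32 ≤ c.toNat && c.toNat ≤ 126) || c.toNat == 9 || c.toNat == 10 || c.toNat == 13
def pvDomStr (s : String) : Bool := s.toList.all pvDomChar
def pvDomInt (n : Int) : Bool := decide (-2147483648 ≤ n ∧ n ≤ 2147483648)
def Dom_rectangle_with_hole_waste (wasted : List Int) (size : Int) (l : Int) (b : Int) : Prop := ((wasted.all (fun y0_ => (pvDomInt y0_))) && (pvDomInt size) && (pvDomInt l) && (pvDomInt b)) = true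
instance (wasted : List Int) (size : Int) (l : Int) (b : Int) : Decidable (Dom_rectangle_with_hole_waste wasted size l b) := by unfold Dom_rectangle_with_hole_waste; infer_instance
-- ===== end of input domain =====

-- B replaces A's full-grid scan with an OR-branch by a complement construction
-- (kept rectangle enumerated once as a set, every other grid cell wasted); same cost.


-- ===== PORT A =====
def rectangle_with_hole_waste (wasted : List Int) (size : Int) (l : Int) (b : Int) : List Int :=
  let w1 := (PySem.List.pyRange 0 size 1).foldl (fun s r =>
      (PySem.List.pyRange 0 size 1).foldl (fun s c =>
        if l ≤ r ∨ b ≤ c then PySem.Set.add s (r * size + c) else s) s) wasted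
  (PySem.List.pyRange (l - 8) (l - 3) 1).foldl (fun s r =>
      (PySem.List.pyRange 3 8 1).foldl (fun s c => PySem.Set.add s (r * size + c)) s) w1

-- ===== PORT B =====
def rectangle_with_hole_waste_alt (wasted : List Int) (size : Int) (l : Int) (b : Int) : List Int :=
  let kept : PySem.Set Int := PySem.Set.ofList ((PySem.List.pyRange 0 (min l size) 1).flatMap (fun r =>
      (PySem.List.pyRange 0 (min b size) 1).map (fun c => r * size + c)))
  let grid := (PySem.List.pyRange 0 size 1).flatMap (fun r =>
      (PySem.List.pyRange 0 size 1).map (fun c => r * size + c))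
  let w1 := PySem.Set.update wasted (grid.filter (fun i => !(PySem.Set.contains kept i)))
  PySem.Set.update w1 ((PySem.List.pyRange (l - 8) (l - 3) 1).flatMap (fun r =>
      (PySem.List.pyRange 3 8 1).map (fun c => r * size + c)))

-- ===== PRECONDITION & SPEC =====
def Spec_rectangle_with_hole_waste (wasted : List Int) (size : Int) (l : Int) (b : Int) (out : List Int) : Prop := out = rectangle_with_hole_waste_alt wasted size l b
instance (wasted : List Int) (size : Int) (l : Int) (b : Int) (out : List Int) : Decidable (Spec_rectangle_with_hole_waste wasted size l b out) := by unfold Spec_rectangle_with_hole_waste; infer_instance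

-- ===== CLAIM (what is proved, stated in full; the proofs are below) =====
def Claim_equal_rectangle_with_hole_waste : Prop := ∀ (wasted : List Int) (size : Int) (l : Int) (b : Int), Dom_rectangle_with_hole_waste wasted size l b → Spec_rectangle_with_hole_waste wasted size l b (rectangle_with_hole_waste wasted size l b)

-- ===== LEMMAS AND PROOFS =====

-- a nested add-loop is a single add-fold over the flattened index list
theorem pv_nested_add (rows : List Int) (cols : Int → List Int) (f : Int → Int → Int)
    (s : List Int) :
    rows.foldl (fun s r => (cols r).foldl (fun s c => PySem.Set.add s (f r c)) s) s
      = (rows.flatMap (fun r => (cols r).map (f r))).foldl PySem.Set.add s := by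
  induction rows generalizing s with
  | nil => rfl
  | cons r rs ih => simp [List.foldl_append, List.foldl_map, ih]

-- unique decomposition of a cell index
theorem pv_cell_unique {size r c r' c' : Int} (hc : 0 ≤ c) (hc2 : c < size)
    (hc' : 0 ≤ c') (hc2' : c' < size) (h : r * size + c = r' * size + c') :
    r = r' ∧ c = c' := by
  have hr : r = r' := by
    rcases lt_trichotomy r r' with hlt | he | hgt
    · nlinarith
    · exact he
    · nlinarith
  subst hr
  constructor <;> omega

-- membership in the kept rectangle, for a cell (r,c) of the grid
theorem pv_kept_mem (size l b r c : Int) (hr : 0 ≤ r) (hr2 : r < size)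
    (hc : 0 ≤ c) (hc2 : c < size) :
    (r * size + c ∈ (PySem.List.pyRange 0 (min l size) 1).flatMap (fun r' =>
        (PySem.List.pyRange 0 (min b size) 1).map (fun c' => r' * size + c'))) ↔
      (r < l ∧ c < b) := by
  simp only [List.mem_flatMap, List.mem_map, PySem.List.mem_pyRange_one]
  constructor
  · rintro ⟨r', ⟨hr'0, hr'⟩, c', ⟨hc'0, hc'⟩, he⟩
    obtain ⟨h1, h2⟩ := pv_cell_unique hc hc2 hc'0 (lt_of_lt_of_le hc' (min_le_right _ _)) he.symm
    constructor <;> omega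
  · rintro ⟨h1, h2⟩
    exact ⟨r, ⟨hr, by omega⟩, c, ⟨hc, by omega⟩, rfl⟩

-- a filter distributes over flatMap
theorem pv_filter_flatMap {α β : Type} (xs : List α) (g : α → List β) (p : β → Bool) :
    (xs.flatMap g).filter p = xs.flatMap (fun x => (g x).filter p) := by
  induction xs with
  | nil => rfl
  | cons x t ih => simp [List.filter_append, ih]

-- congruence for flatMap over the same list
theorem pv_flatMap_congr {α β : Type} (xs : List α) (g h : α → List β)
    (he : ∀ x ∈ xs, g x = h x) : xs.flatMap g = xs.flatMap h := by
  induction xs with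
  | nil => rfl
  | cons x t ih => simp [he x (by simp), ih (fun y hy => he y (by simp [hy]))]

-- the complement-filtered grid equals the flattened filtered grid of A
theorem pv_grid_eq (size l b : Int) :
    (((PySem.List.pyRange 0 size 1).flatMap (fun r =>
        (PySem.List.pyRange 0 size 1).map (fun c => r * size + c))).filter (fun i =>
        !(PySem.Set.contains (PySem.Set.ofList ((PySem.List.pyRange 0 (min l size) 1).flatMap (fun r =>
          (PySem.List.pyRange 0 (min b size) 1).map (fun c => r * size + c)))) i)))
      = (PySem.List.pyRange 0 size 1).flatMap (fun r =>
          ((PySem.List.pyRange 0 size 1).filter (fun c => decide (l ≤ r ∨ b ≤ c))).map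
            (fun c => r * size + c)) := by
  rw [pv_filter_flatMap]
  apply pv_flatMap_congr
  intro r hr
  rw [PySem.List.mem_pyRange_one] at hr
  rw [List.filter_map]
  congr 1
  apply List.filter_congr
  intro c hc
  rw [PySem.List.mem_pyRange_one] at hc
  have hmem := pv_kept_mem size l b r c hr.1 hr.2 hc.1 hc.2
  have hiff : (r * size + c ∈ PySem.Set.ofList ((PySem.List.pyRange 0 (min l size) 1).flatMap (fun r' =>
      (PySem.List.pyRange 0 (min b size) 1).map (fun c' => r' * size + c')))) ↔
      (r < l ∧ c < b) := (PySem.Set.mem_ofList _ _).trans hmem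
  simp only [Function.comp_apply]
  simp [PySem.Set.contains, hiff]
  by_cases h1 : l ≤ r <;> by_cases h2 : b ≤ c <;>
    simp [h1, h2, show ¬(r < l) ↔ l ≤ r by omega, show ¬(c < b) ↔ b ≤ c by omega] <;> omega

theorem rectangle_with_hole_waste_spec' (wasted : List Int) (size l b : Int) :
    rectangle_with_hole_waste wasted size l b = rectangle_with_hole_waste_alt wasted size l b := by
  unfold rectangle_with_hole_waste rectangle_with_hole_waste_alt
  have hupd : ∀ (s xs : List Int), PySem.Set.update s xs = xs.foldl PySem.Set.add s :=
    fun _ _ => rfl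
  rw [hupd, hupd]
  -- the hole block: nested add-loop = add-fold over the flattened list (both sides)
  rw [pv_nested_add (PySem.List.pyRange (l - 8) (l - 3) 1)
        (fun _ => PySem.List.pyRange 3 8 1) (fun r c => r * size + c)]
  -- the grid block
  congr 1
  rw [PySem.List.foldl_congr_mem (PySem.List.pyRange 0 size 1)
        (fun s r => (PySem.List.pyRange 0 size 1).foldl
          (fun s c => if l ≤ r ∨ b ≤ c then PySem.Set.add s (r * size + c) else s) s)
        (fun s r => ((PySem.List.pyRange 0 size 1).filter (fun c => decide (l ≤ r ∨ b ≤ c))).foldl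
          (fun s c => PySem.Set.add s (r * size + c)) s)
        wasted
        (fun acc r _ => PySem.List.foldl_ite_eq_foldl_filter (fun c => l ≤ r ∨ b ≤ c)
          (fun s c => PySem.Set.add s (r * size + c)) (PySem.List.pyRange 0 size 1) acc)]
  rw [pv_nested_add (PySem.List.pyRange 0 size 1)
        (fun r => (PySem.List.pyRange 0 size 1).filter (fun c => decide (l ≤ r ∨ b ≤ c)))
        (fun r c => r * size + c)]
  rw [pv_grid_eq size l b]

-- ===== VERDICT (by name: the statement is the Claim_ definition above) =====
theorem rectangle_with_hole_waste_spec : Claim_equal_rectangle_with_hole_waste := by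
  intro wasted size l b _
  exact rectangle_with_hole_waste_spec' wasted size l b
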